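-- pv_equiv track=rewrite | github.com/angn731/chemical-synthesis-pipeline | main/src/GroupByTemp.py | count_products
-- ===== SOURCE A (Python) =====
-- def iterate_reactions(rxns, products):
--     """
--     Helper function that counts the number of products
--     in a given list of reactions.
--     """
--     update_count = 0
--     # eaxh rxn is a dict with one k,v pair
--     for rxn in rxns:
--         for k in rxn.keys():
--             if k.split('>>')[1] in products:
--                 update_count += 1
--     return update_count
--
-- def count_products(wellplates, num, products):
--     """
--     Helper function that returns the number of products produced in the
--     first "num" wellplates of a sequence.
--     """
--     count = 0
--     for i in range(0, num):
--         for k in wellplates.keys():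
--             if k.startswith(f'{str(i)}_'):
--                 rxns = wellplates[k]
--                 update_count = iterate_reactions(rxns, products)
--                 count += update_count
--                 break
--     return count
-- ===== SOURCE B (Python) =====
-- def count_products(wellplates, num, products):
--     product_set = set(products)
--     prefix_counts = {}
--     for key, rxns in wellplates.items():
--         pos = key.find('_')
--         if pos != -1:
--             prefix = key[:pos]
--             if prefix not in prefix_counts:
--                 c = 0
--                 for rxn in rxns:
--                     for k in rxn:
--                         parts = k.split('>>')
--                         if len(parts) > 1 and parts[1] in product_set:
--                             c += 1
--                 prefix_counts[prefix] = c
--     total = 0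
--     for i in range(0, num):
--         total += prefix_counts.get(str(i), 0)
--     return total
-- ===== Notes on version B (the rewrite author's own statement) =====
-- stated objective: faster
-- what changed: A rescans every wellplate key and recounts its reactions for each i in range(num); B makes one pass over the wellplates building a dict mapping each key's prefix before '_' to its product count (first occurrence wins, products held in a set), then answers each i with a single dict lookup of str(i).
import Mathlib
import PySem

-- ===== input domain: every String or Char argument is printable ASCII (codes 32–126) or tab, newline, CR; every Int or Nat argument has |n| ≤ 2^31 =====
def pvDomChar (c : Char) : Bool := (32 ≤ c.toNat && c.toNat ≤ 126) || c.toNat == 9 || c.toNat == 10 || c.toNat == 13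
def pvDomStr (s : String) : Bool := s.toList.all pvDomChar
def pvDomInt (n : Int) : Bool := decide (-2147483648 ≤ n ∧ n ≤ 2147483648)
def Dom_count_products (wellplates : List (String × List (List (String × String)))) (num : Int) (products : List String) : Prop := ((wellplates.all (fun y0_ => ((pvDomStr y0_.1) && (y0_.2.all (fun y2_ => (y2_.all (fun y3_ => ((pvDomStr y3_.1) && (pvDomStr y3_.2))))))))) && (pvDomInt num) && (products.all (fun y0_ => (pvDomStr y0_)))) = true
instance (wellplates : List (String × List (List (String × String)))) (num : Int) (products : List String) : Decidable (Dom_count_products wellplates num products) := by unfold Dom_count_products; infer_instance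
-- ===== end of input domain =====

-- B replaces A's per-i rescan of all wellplate keys and recount of reactions by one pass that
-- builds a prefix → reaction-count dictionary, then answers each i with a single dict lookup.

-- Python's k.split('>>') (sep ≠ "", so split? is always some); used by both ports and by Pre_
def pvParts (k : String) : List (List Char) := (PySem.Chars.split? k.toList ['>', '>']).getD []

-- ===== PORT A =====
-- helper iterate_reactions: counts rxn keys whose part after '>>' is in products
def pvIterA (rxns : List (List (String × String))) (products : List String) : Int :=
  rxns.foldl (fun uc rxn =>
    (PySem.Dict.ofList rxn).keys.foldl (fun uc k =>
      if (products.map String.toList).contains (PySem.List.pyGetD (pvParts k) 1 []) then uc + 1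
      else uc) uc) 0

def count_products (wellplates : List (String × List (List (String × String)))) (num : Int) (products : List String) : Int :=
  let d := PySem.Dict.ofList wellplates
  (PySem.List.pyRange 0 num 1).foldl
    (fun count i =>
      -- 'for k in wellplates.keys(): if k.startswith(f"{str(i)}_"): … break' = first matching key
      match d.keys.find? (fun k => PySem.Chars.startswith k.toList (PySem.Int.toChars i ++ ['_'])) with
      | some k => count + pvIterA ((d.get? k).getD []) products
      | none => count) 0

-- ===== PORT B =====
-- pos = key.find('_'); None when pos == -1, else prefix = key[:pos] (pos ≥ 0, so the slice is a take)
def pvPrefOf (s : String) : Option (List Char) :=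
  if PySem.Chars.find s.toList ['_'] = -1 then none
  else some (s.toList.take (PySem.Chars.find s.toList ['_']).toNat)

-- count of product-forming reactions in one wellplate entry (B guards len(parts) > 1)
def pvCntB (rxns : List (List (String × String))) (pset : List (List Char)) : Int :=
  rxns.foldl (fun c rxn =>
    (PySem.Dict.ofList rxn).keys.foldl (fun c k =>
      let parts := pvParts k
      if 1 < parts.length ∧ pset.contains (PySem.List.pyGetD parts 1 []) then c + 1 else c) c) 0

-- one step of B's dict-building loop (first occurrence of a prefix wins)
def pvStepB (pset : List (List Char)) (F : PySem.Dict (List Char) Int)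
    (p : String × List (List (String × String))) : PySem.Dict (List Char) Int :=
  match pvPrefOf p.1 with
  | none => F
  | some pre => if F.contains pre then F else F.insert pre (pvCntB p.2 pset)

def count_products_alt (wellplates : List (String × List (List (String × String)))) (num : Int) (products : List String) : Int :=
  let pset := PySem.Set.ofList (products.map String.toList)
  let F := (PySem.Dict.ofList wellplates).items.foldl (pvStepB pset) PySem.Dict.empty
  (PySem.List.pyRange 0 num 1).foldl (fun t i => t + F.getD (PySem.Int.toChars i) 0) 0

-- ===== PRECONDITION & SPEC =====
-- decimal value and canonical-numeral shape of a prefix (str(i) for some i ≥ 0)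
def pvDecVal (l : List Char) : Int := l.foldl (fun a c => a * 10 + ((c.toNat : Int) - 48)) 0
def pvCanon (l : List Char) : Bool :=
  !l.isEmpty && l.all Char.isDigit && (l == ['0'] || !(l.headD 'x' == '0'))
-- an entry is reached by A iff its key's prefix before '_' is the canonical numeral of some
-- 0 ≤ i < num and it is the first entry carrying that prefix
def pvReached (wellplates : List (String × List (List (String × String)))) (num : Int)
    (p : String × List (List (String × String))) : Bool :=
  match pvPrefOf p.1 with
  | none => false
  | some pre => pvCanon pre && decide (pvDecVal pre < num) &&
      decide ((PySem.Dict.ofList wellplates).items.find? (fun q => pvPrefOf q.1 == some pre) = some p)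

-- Pre_ excludes exactly the inputs where A raises IndexError: some wellplate entry that A reaches
-- (first entry whose key prefix before '_' is str(i) for some 0 ≤ i < num) has a reaction key without '>>'.
def Pre_count_products (wellplates : List (String × List (List (String × String)))) (num : Int) (products : List String) : Prop :=
  ∀ p ∈ (PySem.Dict.ofList wellplates).items, pvReached wellplates num p = true →
    ∀ rxn ∈ p.2, ∀ k ∈ (PySem.Dict.ofList rxn).keys, 1 < (pvParts k).length
instance (wellplates : List (String × List (List (String × String)))) (num : Int) (products : List String) : Decidable (Pre_count_products wellplates num products) := by unfold Pre_count_products; infer_instance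

def pvWitness_count_products : (List (String × List (List (String × String)))) × Int × List String :=
  ([("0_a", [[("a>>b", "x")], [("c>>d", "y")]]), ("1_b", [[("a>>d", "z")]])], 2, ["b", "d"])

def Spec_count_products (wellplates : List (String × List (List (String × String)))) (num : Int) (products : List String) (out : Int) : Prop := out = count_products_alt wellplates num products
instance (wellplates : List (String × List (List (String × String)))) (num : Int) (products : List String) (out : Int) : Decidable (Spec_count_products wellplates num products out) := by unfold Spec_count_products; infer_instance

-- ===== CLAIM (what is proved, stated in full; the proofs are below) =====
def Claim_equal_count_products : Prop := ∀ (wellplates : List (String × List (List (String × String)))) (num : Int) (products : List String), Dom_count_products wellplates num products → Pre_count_products wellplates num products → Spec_count_products wellplates num products (count_products wellplates num products)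

-- ===== LEMMAS AND PROOFS =====

-- [c] is a prefix of l iff l starts with c
theorem pv_singleton_prefix (c : Char) (l : List Char) : [c] <+: l ↔ l.head? = some c := by
  cases l with
  | nil => simp
  | cons a t => simp [List.cons_prefix_iff, eq_comm]

-- the first '_' of tc ++ '_' :: rest is at index tc.length when tc has no '_'
theorem pv_find_underscore (tc rest : List Char) (h : ∀ c ∈ tc, c ≠ '_') :
    PySem.Chars.find (tc ++ '_' :: rest) ['_'] = (tc.length : Int) := by
  set s := tc ++ '_' :: rest with hs
  have hmem : '_' ∈ s := by simp [hs]
  have hnn : 0 ≤ PySem.Chars.find s ['_'] := by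
    rw [PySem.Chars.find_nonneg_iff]
    exact (List.singleton_infix_iff '_' s).mpr hmem
  obtain ⟨hpre, hmin⟩ := PySem.Chars.find_spec hnn
  have hat : s[tc.length]? = some '_' := by
    rw [hs, List.getElem?_append_right (le_refl _)]
    simp
  have hle : (PySem.Chars.find s ['_']).toNat ≤ tc.length := by
    by_contra hgt
    exact hmin tc.length (by omega) ((pv_singleton_prefix _ _).mpr (by rw [List.head?_drop]; exact hat))
  have hge : ¬ (PySem.Chars.find s ['_']).toNat < tc.length := by
    intro hlt
    have h1 : s[(PySem.Chars.find s ['_']).toNat]? = some '_' := by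
      rw [← List.head?_drop]; exact (pv_singleton_prefix _ _).mp hpre
    rw [hs, List.getElem?_append_left hlt] at h1
    have := h (tc[(PySem.Chars.find s ['_']).toNat]'hlt) (by simp)
    simp [List.getElem?_eq_getElem hlt] at h1
    exact this h1
  omega

-- the first digit of str(n) for 0 < n is not '0'
theorem pv_head_toDigits (n : Nat) (hn : 0 < n) : ∀ d, (Nat.toDigits 10 n).head? = some d → d ≠ '0' := by
  induction n using Nat.strong_induction_on with
  | _ n ih =>
    intro d hd
    rw [Nat.toDigits_eq_if (by norm_num)] at hd
    by_cases h : n < 10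
    · simp [h] at hd
      interval_cases n <;> simp_all <;> subst hd <;> decide
    · simp [h] at hd
      have h1 : Nat.toDigits 10 (n / 10) ≠ [] := by
        have := @Nat.length_toDigits_pos 10 (n / 10)
        intro hc; simp [hc] at this
      obtain ⟨e, he⟩ : ∃ e, (Nat.toDigits 10 (n / 10)).head? = some e := by
        cases hh : (Nat.toDigits 10 (n / 10)).head? with
        | none => exact absurd (List.head?_eq_none_iff.mp hh) h1
        | some e => exact ⟨e, rfl⟩
      rw [he] at hd
      simp at hd
      subst hd
      exact ih (n / 10) (by omega) (by omega) e he

theorem pv_decVal_toDigits (n : Nat) : pvDecVal (Nat.toDigits 10 n) = n := by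
  induction n using Nat.strong_induction_on with
  | _ n ih =>
    rw [Nat.toDigits_eq_if (by norm_num)]
    by_cases h : n < 10
    · simp only [h, if_true]
      interval_cases n <;> decide
    · simp only [h, if_false]
      have hm : n % 10 < 10 := Nat.mod_lt _ (by norm_num)
      have hdc : ((n % 10).digitChar.toNat : Int) - 48 = ((n % 10 : Nat) : Int) := by
        set m := n % 10 with hmdef
        interval_cases m <;> decide
      unfold pvDecVal at *
      rw [List.foldl_append]
      simp only [List.foldl_cons, List.foldl_nil]
      rw [ih (n / 10) (by omega), hdc]
      push_cast
      omega

theorem pv_toChars_nonneg (i : Int) (hi : 0 ≤ i) :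
    PySem.Int.toChars i = Nat.toDigits 10 i.toNat := by
  unfold PySem.Int.toChars
  rw [if_neg (by omega)]

theorem pv_toChars_digits (i : Int) (hi : 0 ≤ i) : ∀ c ∈ PySem.Int.toChars i, c.isDigit = true := by
  rw [pv_toChars_nonneg i hi]
  intro c hc
  exact Nat.isDigit_of_mem_toDigits (by norm_num) (by norm_num) hc

theorem pv_toChars_no_underscore (i : Int) (hi : 0 ≤ i) : ∀ c ∈ PySem.Int.toChars i, c ≠ '_' := by
  intro c hc he
  have := pv_toChars_digits i hi c hc
  subst he
  simp at this

theorem pv_toChars_canon (i : Int) (hi : 0 ≤ i) : pvCanon (PySem.Int.toChars i) = true := by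
  rw [pv_toChars_nonneg i hi]
  unfold pvCanon
  rcases Nat.eq_zero_or_pos i.toNat with h0 | hpos
  · rw [h0, Nat.toDigits_zero]; decide
  · have hne : Nat.toDigits 10 i.toNat ≠ [] := by
      have := @Nat.length_toDigits_pos 10 i.toNat
      intro hc; simp [hc] at this
    obtain ⟨e, he⟩ : ∃ e, (Nat.toDigits 10 i.toNat).head? = some e := by
      cases hh : (Nat.toDigits 10 i.toNat).head? with
      | none => exact absurd (List.head?_eq_none_iff.mp hh) hne
      | some e => exact ⟨e, rfl⟩
    have hd := pv_head_toDigits i.toNat hpos e he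
    simp only [Bool.and_eq_true, Bool.or_eq_true, List.all_eq_true]
    refine ⟨⟨by simpa using hne, ?_⟩, Or.inr ?_⟩
    · intro c hc; exact Nat.isDigit_of_mem_toDigits (by norm_num) (by norm_num) hc
    · simp [List.headD_eq_head?_getD, he]
      exact hd

theorem pv_toChars_decVal (i : Int) (hi : 0 ≤ i) : pvDecVal (PySem.Int.toChars i) = i := by
  rw [pv_toChars_nonneg i hi, pv_decVal_toDigits]
  omega

-- A's startswith test recognises exactly the prefix B extracts
theorem pv_prefix_iff' (tc : List Char) (htc : ∀ c ∈ tc, c ≠ '_') (s : String) :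
    PySem.Chars.startswith s.toList (tc ++ ['_']) = (pvPrefOf s == some tc) := by
  rw [Bool.eq_iff_iff, PySem.Chars.startswith_iff, beq_iff_eq]
  constructor
  · rintro ⟨t, ht⟩
    have hsl : s.toList = tc ++ '_' :: t := by rw [← ht]; simp
    unfold pvPrefOf
    rw [hsl, pv_find_underscore tc t htc]
    rw [if_neg (by omega)]
    simp [List.take_left']
  · intro hp
    unfold pvPrefOf at hp
    split at hp
    · exact absurd hp (by simp)
    · rename_i hne
      have hnn : 0 ≤ PySem.Chars.find s.toList ['_'] := by
        have := PySem.Chars.neg_one_le_find s.toList ['_']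
        omega
      obtain ⟨hpre, -⟩ := PySem.Chars.find_spec hnn
      have hh := (pv_singleton_prefix _ _).mp hpre
      rw [List.head?_drop] at hh
      have hlt : (PySem.Chars.find s.toList ['_']).toNat < s.toList.length := by
        by_contra hge
        have hlen : s.toList.length ≤ (PySem.Chars.find s.toList ['_']).toNat := by omega
        rw [List.getElem?_eq_none hlen] at hh
        simp at hh
      have hdrop : List.drop (PySem.Chars.find s.toList ['_']).toNat s.toList =
          '_' :: List.drop ((PySem.Chars.find s.toList ['_']).toNat + 1) s.toList := by
        rw [List.drop_eq_getElem_cons hlt]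
        congr 1
        exact Option.some_injective _ (by rw [← List.getElem?_eq_getElem]; exact hh)
      have htake := Option.some_injective _ hp
      refine ⟨List.drop ((PySem.Chars.find s.toList ['_']).toNat + 1) s.toList, ?_⟩
      calc tc ++ ['_'] ++ List.drop ((PySem.Chars.find s.toList ['_']).toNat + 1) s.toList
          = tc ++ ('_' :: List.drop ((PySem.Chars.find s.toList ['_']).toNat + 1) s.toList) := by simp
        _ = List.take (PySem.Chars.find s.toList ['_']).toNat s.toList ++
              List.drop (PySem.Chars.find s.toList ['_']).toNat s.toList := by rw [htake, hdrop]
        _ = s.toList := List.take_append_drop _ _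

theorem pv_get?_none_of_not_contains (G : PySem.Dict (List Char) Int) (pre : List Char)
    (hG : G.contains pre = false) : G.get? pre = none := by
  have := PySem.Dict.contains_eq_isSome_get? (d := G) (k := pre)
  rw [hG] at this
  cases hgv : G.get? pre with
  | none => rfl
  | some v => rw [hgv] at this; simp at this

theorem pv_get?_some_of_contains (G : PySem.Dict (List Char) Int) (pre : List Char)
    (hG : G.contains pre = true) : ∃ v, G.get? pre = some v := by
  have := PySem.Dict.contains_eq_isSome_get? (d := G) (k := pre)
  rw [hG] at this
  cases hgv : G.get? pre with
  | none => rw [hgv] at this; simp at this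
  | some v => exact ⟨v, rfl⟩

-- characterisation of B's dict-building fold: lookup = first entry with that prefix
theorem pv_foldl_stepB_get? (pset : List (List Char)) (l : List (String × List (List (String × String))))
    (G : PySem.Dict (List Char) Int) (c : List Char) :
    (l.foldl (pvStepB pset) G).get? c =
      (G.get? c).or ((l.find? (fun p => pvPrefOf p.1 == some c)).map (fun p => pvCntB p.2 pset)) := by
  induction l generalizing G with
  | nil => simp
  | cons p tl ih =>
    rw [List.foldl_cons, List.find?_cons]
    cases hp : pvPrefOf p.1 with
    | none =>
      rw [show pvStepB pset G p = G from by unfold pvStepB; rw [hp]]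
      rw [ih]
      simp
    | some pre =>
      by_cases hc : pre = c
      · subst hc
        simp only [beq_self_eq_true]
        by_cases hG : G.contains pre
        · rw [show pvStepB pset G p = G from by unfold pvStepB; rw [hp]; simp [hG]]
          rw [ih]
          obtain ⟨v, hv⟩ := pv_get?_some_of_contains G pre hG
          rw [hv]
          simp
        · rw [show pvStepB pset G p = G.insert pre (pvCntB p.2 pset) from by
            unfold pvStepB; rw [hp]; simp [hG]]
          rw [ih, PySem.Dict.get?_insert_self,
            pv_get?_none_of_not_contains G pre (by simpa using hG)]
          simp
      · simp only [show ((some pre == some c) = false) from by simpa using hc]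
        by_cases hG : G.contains pre
        · rw [show pvStepB pset G p = G from by unfold pvStepB; rw [hp]; simp [hG]]
          exact ih G
        · rw [show pvStepB pset G p = G.insert pre (pvCntB p.2 pset) from by
            unfold pvStepB; rw [hp]; simp [hG]]
          rw [ih, PySem.Dict.get?_insert_of_ne _ _ (fun h => hc h.symm)]

-- on an entry all of whose reaction keys split, A's count equals B's count
theorem pv_iter_eq (rxns : List (List (String × String))) (products : List String)
    (h : ∀ rxn ∈ rxns, ∀ k ∈ (PySem.Dict.ofList rxn).keys, 1 < (pvParts k).length) :
    pvIterA rxns products = pvCntB rxns (PySem.Set.ofList (products.map String.toList)) := by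
  unfold pvIterA pvCntB
  apply PySem.List.foldl_congr_mem
  intro acc rxn hr
  apply PySem.List.foldl_congr_mem
  intro acc2 k hk
  have hlen := h rxn hr k hk
  dsimp only
  have hset : ((PySem.Set.ofList (products.map String.toList)).contains
      (PySem.List.pyGetD (pvParts k) 1 []) = true) ↔
      ((products.map String.toList).contains (PySem.List.pyGetD (pvParts k) 1 []) = true) := by
    rw [PySem.Set.contains_iff, PySem.Set.mem_ofList]
    simp
  split_ifs with ha hb hb
  · rfl
  · exact absurd ⟨hlen, hset.mpr ha⟩ hb
  · exact absurd (hset.mp hb.2) ha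
  · rfl

-- ===== VERDICT (by name: the statement is the Claim_ definition above) =====
theorem count_products_spec : Claim_equal_count_products := by
  intro wellplates num products _ hpre
  unfold Spec_count_products count_products count_products_alt
  dsimp only
  apply PySem.List.foldl_congr_mem
  intro acc i hi
  rw [PySem.List.mem_pyRange_one] at hi
  obtain ⟨hi0, hin⟩ := hi
  have hfun : (fun k : String => PySem.Chars.startswith k.toList (PySem.Int.toChars i ++ ['_'])) ∘
      (Prod.fst (β := List (List (String × String)))) =
      (fun q : String × List (List (String × String)) => pvPrefOf q.1 == some (PySem.Int.toChars i)) := by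
    funext q
    exact pv_prefix_iff' (PySem.Int.toChars i) (pv_toChars_no_underscore i hi0) q.1
  have hkeys : (PySem.Dict.ofList wellplates).keys =
      (PySem.Dict.ofList wellplates).items.map (·.1) := rfl
  rw [hkeys, List.find?_map, hfun, PySem.Dict.getD_eq_get?_getD,
    pv_foldl_stepB_get? (PySem.Set.ofList (products.map String.toList))
      (PySem.Dict.ofList wellplates).items PySem.Dict.empty (PySem.Int.toChars i),
    PySem.Dict.get?_empty]
  cases hfind : (PySem.Dict.ofList wellplates).items.find?
      (fun q => pvPrefOf q.1 == some (PySem.Int.toChars i)) with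
  | none => simp
  | some p =>
    have hpmem : p ∈ (PySem.Dict.ofList wellplates).items := List.mem_of_find?_eq_some hfind
    have hppre : pvPrefOf p.1 = some (PySem.Int.toChars i) := by
      have := List.find?_some hfind
      simpa using this
    have hget : (PySem.Dict.ofList wellplates).get? p.1 = some p.2 :=
      PySem.Dict.get?_of_mem_items _ (by exact hpmem) (PySem.Dict.nodup_keys_ofList _)
    have hreach : pvReached wellplates num p = true := by
      unfold pvReached
      rw [hppre]
      simp only [Bool.and_eq_true, decide_eq_true_eq]
      exact ⟨⟨pv_toChars_canon i hi0, by rw [pv_toChars_decVal i hi0]; exact hin⟩, hfind⟩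
    have hkeysOK := hpre p hpmem hreach
    simp only [Option.map_some, Option.none_or, Option.getD_some, hget]
    rw [pv_iter_eq p.2 products hkeysOK]
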